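-- pv_equiv track=rewrite | github.com/FranzOle/Matematika-Komputasi | Source File 2/praktikum10/prak1-1.py | is_valid_partition
-- ===== SOURCE A (Python) =====
-- def is_valid_partition(original_set, partition):
--     # Langkah 1: Gabungkan semua elemen dalam partisi menjadi satu.
--     combined_set = set().union(*partition)
--
--     # Langkah 2: Cek dua kondisi utama secara bersamaan.
--     # Kondisi A: Apakah gabungan semua partisi sama persis dengan himpunan asli?
--     # Kondisi B: Apakah jumlah total elemen di semua partisi (jika dijumlahkan satu per satu)
--     is_fully_covered = (combined_set == original_set)
--     is_not_overlapping = (sum(len(part) for part in partition) == len(original_set))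
--
--     # Jika kedua kondisi terpenuhi maka ini adalah partisi yang valid
--     if is_fully_covered and is_not_overlapping:
--         return True, "Benar ini merupakan partisi yang valid."
--     else:
--         return False, "Ini bukan merupakan partisi yang valid."
-- ===== SOURCE B (Python) =====
-- def is_valid_partition(original_set, partition):
--     # Single pass: detect any overlap/duplicate the moment it appears.
--     seen = set()
--     for part in partition:
--         for x in part:
--             if x in seen:
--                 return False, "Ini bukan merupakan partisi yang valid."
--             seen.add(x)
--     if seen == set(original_set):
--         return True, "Benar ini merupakan partisi yang valid."
--     return False, "Ini bukan merupakan partisi yang valid."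
-- ===== Notes on version B (the rewrite author's own statement) =====
-- stated objective: alternative
-- what changed: Replaces A's one-shot union of all parts plus the sum-of-lengths counting trick with a single incremental pass that early-returns on the first repeated element and then compares the accumulated seen set with set(original_set); Pre_ only states the set-encoding invariant of the type convention (the List Int arguments represent Python sets, so they are duplicate-free), which excludes no actual Python input.
import Mathlib
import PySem

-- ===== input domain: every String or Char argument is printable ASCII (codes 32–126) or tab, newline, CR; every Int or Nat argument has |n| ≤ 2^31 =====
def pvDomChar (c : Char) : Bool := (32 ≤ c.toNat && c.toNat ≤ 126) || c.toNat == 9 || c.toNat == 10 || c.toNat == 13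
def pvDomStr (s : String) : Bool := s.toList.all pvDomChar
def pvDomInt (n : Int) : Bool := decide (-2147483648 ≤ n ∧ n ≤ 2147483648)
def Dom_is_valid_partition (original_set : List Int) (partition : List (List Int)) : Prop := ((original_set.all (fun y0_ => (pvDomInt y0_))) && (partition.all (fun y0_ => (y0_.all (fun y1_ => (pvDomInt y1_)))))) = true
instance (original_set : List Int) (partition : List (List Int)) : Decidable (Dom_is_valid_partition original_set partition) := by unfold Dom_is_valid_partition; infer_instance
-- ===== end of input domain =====

-- B replaces A's one-shot union + length-sum counting with a single incremental pass over the
-- parts that early-returns on the first repeated element and then compares the accumulated set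
-- with set(original_set) (objective: alternative decomposition, same cost).

-- ===== PORT A =====
def is_valid_partition (original_set : List Int) (partition : List (List Int)) : Bool × String :=
  -- combined_set = set().union(*partition)
  let combined_set : PySem.Set Int :=
    partition.foldl (fun s part => PySem.Set.union s part) PySem.Set.empty
  -- is_fully_covered = (combined_set == original_set)   (set == set: element-wise equality)
  let is_fully_covered : Bool := PySem.Set.equal combined_set original_set
  -- is_not_overlapping = (sum(len(part) for part in partition) == len(original_set))
  let is_not_overlapping : Bool :=
    (partition.foldl (fun acc part => acc + (part.length : Int)) 0) == (original_set.length : Int)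
  if is_fully_covered && is_not_overlapping then
    (true, "Benar ini merupakan partisi yang valid.")
  else
    (false, "Ini bukan merupakan partisi yang valid.")

-- ===== PORT B =====
-- the inner 'for x in part' loop: none = early 'return False' (x already seen)
def pvScanPart (seen : PySem.Set Int) : List Int → Option (PySem.Set Int)
  | [] => some seen
  | x :: xs => if PySem.Set.contains seen x then none else pvScanPart (PySem.Set.add seen x) xs

-- the outer 'for part in partition' loop
def pvScanParts (seen : PySem.Set Int) : List (List Int) → Option (PySem.Set Int)
  | [] => some seen
  | p :: ps =>
      match pvScanPart seen p with
      | none => none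
      | some s => pvScanParts s ps

def is_valid_partition_alt (original_set : List Int) (partition : List (List Int)) : Bool × String :=
  match pvScanParts PySem.Set.empty partition with
  | none => (false, "Ini bukan merupakan partisi yang valid.")
  | some seen =>
      if PySem.Set.equal seen (PySem.Set.ofList original_set) then
        (true, "Benar ini merupakan partisi yang valid.")
      else
        (false, "Ini bukan merupakan partisi yang valid.")

-- ===== PRECONDITION & SPEC =====
-- Pre_ states the set-encoding invariant of the type convention: the Python arguments are
-- set[int] / list[set[int]], so the lists representing them are duplicate-free; a List Int with
-- duplicates encodes no Python input of this function (A's length-count and B's set comparison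
-- may disagree on such phantom lists).
def Pre_is_valid_partition (original_set : List Int) (partition : List (List Int)) : Prop :=
  original_set.Nodup ∧ ∀ p ∈ partition, p.Nodup
instance (original_set : List Int) (partition : List (List Int)) : Decidable (Pre_is_valid_partition original_set partition) := by unfold Pre_is_valid_partition; infer_instance

def pvWitness_is_valid_partition : List Int × List (List Int) := ([1, 2, 3], [[1, 3], [2]])

def Spec_is_valid_partition (original_set : List Int) (partition : List (List Int)) (out : Bool × String) : Prop := out = is_valid_partition_alt original_set partition
instance (original_set : List Int) (partition : List (List Int)) (out : Bool × String) : Decidable (Spec_is_valid_partition original_set partition out) := by unfold Spec_is_valid_partition; infer_instance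

-- ===== CLAIM (what is proved, stated in full; the proofs are below) =====
def Claim_equal_is_valid_partition : Prop := ∀ (original_set : List Int) (partition : List (List Int)), Dom_is_valid_partition original_set partition → Pre_is_valid_partition original_set partition → Spec_is_valid_partition original_set partition (is_valid_partition original_set partition)

-- ===== LEMMAS AND PROOFS =====

-- A's combined set: membership = membership in some part, and it is duplicate-free.
theorem pvUnion_mem (ps : List (List Int)) (s : PySem.Set Int) (y : Int) :
    y ∈ ps.foldl (fun s p => PySem.Set.union s p) s ↔ y ∈ s ∨ y ∈ ps.flatten := by
  induction ps generalizing s with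
  | nil => simp
  | cons p ps ih =>
      simp only [List.foldl_cons, List.flatten_cons, ih, PySem.Set.mem_union, List.mem_append]
      tauto

-- A's sum of part lengths is the length of the flattened partition.
theorem pvSum_len (ps : List (List Int)) (a : Int) :
    ps.foldl (fun acc part => acc + (part.length : Int)) a = a + (ps.flatten.length : Int) := by
  induction ps generalizing a with
  | nil => simp
  | cons p ps ih => simp [ih]; ring

-- B's inner loop over xs ++ ys = inner loop over xs, then over ys.
theorem pvScanPart_append (xs ys : List Int) (seen : PySem.Set Int) :
    pvScanPart seen (xs ++ ys) =
      match pvScanPart seen xs with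
      | none => none
      | some s => pvScanPart s ys := by
  induction xs generalizing seen with
  | nil => simp [pvScanPart]
  | cons x xs ih =>
      simp only [List.cons_append, pvScanPart]
      split <;> simp [ih]

-- B's double loop = a single loop over the flattened partition.
theorem pvScanParts_eq (ps : List (List Int)) (seen : PySem.Set Int) :
    pvScanParts seen ps = pvScanPart seen ps.flatten := by
  induction ps generalizing seen with
  | nil => simp [pvScanParts, pvScanPart]
  | cons p ps ih =>
      simp only [pvScanParts, List.flatten_cons, pvScanPart_append]
      cases pvScanPart seen p <;> simp [ih]

-- If the scan completes, the elements were pairwise fresh: the result's members are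
-- seen ∪ l, it is duplicate-free, and its length is |seen| + |l|.
theorem pvScanPart_some (l : List Int) (seen s : PySem.Set Int) (hn : seen.Nodup)
    (h : pvScanPart seen l = some s) :
    s.Nodup ∧ (∀ y, y ∈ s ↔ y ∈ seen ∨ y ∈ l) ∧ s.length = seen.length + l.length := by
  induction l generalizing seen with
  | nil =>
      simp only [pvScanPart, Option.some.injEq] at h
      subst h; simp [hn]
  | cons x xs ih =>
      simp only [pvScanPart] at h
      split at h
      · exact absurd h (by simp)
      · rename_i hc
        have hx : x ∉ seen := by
          intro hm
          exact hc ((PySem.Set.contains_iff _ _).mpr hm)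
        have hadd : PySem.Set.add seen x = seen ++ [x] := PySem.Set.add_of_not_mem hx
        obtain ⟨h1, h2, h3⟩ := ih (PySem.Set.add seen x) (PySem.Set.nodup_add _ _ hn) h
        refine ⟨h1, fun y => ?_, ?_⟩
        · rw [h2 y, PySem.Set.mem_add]
          simp only [List.mem_cons]; tauto
        · rw [h3, hadd]; simp; omega

-- If the scan aborts, some element repeats, so any duplicate-free list with exactly
-- the members seen ∪ l is strictly shorter than |seen| + |l|.
theorem pvScanPart_none (l : List Int) (seen : PySem.Set Int) (hn : seen.Nodup)
    (h : pvScanPart seen l = none) (t : List Int) (ht : t.Nodup)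
    (hm : ∀ y, y ∈ t ↔ y ∈ seen ∨ y ∈ l) : t.length < seen.length + l.length := by
  induction l generalizing seen with
  | nil => simp [pvScanPart] at h
  | cons x xs ih =>
      simp only [pvScanPart] at h
      split at h
      · rename_i hc
        have hx : x ∈ seen := (PySem.Set.contains_iff _ _).mp hc
        have hsub : t ⊆ seen ++ xs := by
          intro y hy
          rcases (hm y).mp hy with hy' | hy'
          · exact List.mem_append.mpr (Or.inl hy')
          · rcases List.mem_cons.mp hy' with rfl | hy''
            · exact List.mem_append.mpr (Or.inl hx)
            · exact List.mem_append.mpr (Or.inr hy'')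
        have := (List.subperm_of_subset ht hsub).length_le
        simp only [List.length_append, List.length_cons] at *
        omega
      · rename_i hc
        have hx : x ∉ seen := by
          intro hm'
          exact hc ((PySem.Set.contains_iff _ _).mpr hm')
        have hadd : PySem.Set.add seen x = seen ++ [x] := PySem.Set.add_of_not_mem hx
        have hlt := ih (PySem.Set.add seen x) (PySem.Set.nodup_add _ _ hn) h
          (fun y => by
            rw [hm y, PySem.Set.mem_add]
            simp only [List.mem_cons]; tauto)
        rw [hadd] at hlt
        simp only [List.length_append, List.length_cons, List.length_nil] at *
        omega

-- Set.empty is the empty list.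
theorem pvEmpty_nodup : (PySem.Set.empty : PySem.Set Int).Nodup := List.nodup_nil

theorem pvEmpty_not_mem (y : Int) : y ∉ (PySem.Set.empty : PySem.Set Int) := by
  simp [PySem.Set.empty]

-- length of the empty set
theorem pvEmpty_len : (PySem.Set.empty : PySem.Set Int).length = 0 := rfl

-- ===== VERDICT (by name: the statement is the Claim_ definition above) =====
theorem is_valid_partition_spec : Claim_equal_is_valid_partition := by
  intro o p _hdom hpre
  obtain ⟨ho, -⟩ := hpre
  show is_valid_partition o p = is_valid_partition_alt o p
  simp only [is_valid_partition, is_valid_partition_alt, pvScanParts_eq, pvSum_len]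
  have hU := pvUnion_mem p PySem.Set.empty
  cases hscan : pvScanPart PySem.Set.empty p.flatten with
  | some s =>
      obtain ⟨hsn, hsm, hsl⟩ := pvScanPart_some p.flatten PySem.Set.empty s pvEmpty_nodup hscan
      have hsame : ∀ y : Int, y ∈ s ↔ y ∈ p.flatten := by
        intro y; rw [hsm y]; simp
      by_cases hq : ∀ y : Int, y ∈ p.flatten ↔ y ∈ o
      · have hBeq : PySem.Set.equal s (PySem.Set.ofList o) = true := by
          rw [PySem.Set.equal_iff _ _]
          intro y; rw [hsame y, PySem.Set.mem_ofList]; exact hq y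
        have hAeq : PySem.Set.equal (p.foldl (fun s part => PySem.Set.union s part) PySem.Set.empty) o = true := by
          rw [PySem.Set.equal_iff _ _]
          intro y; rw [hU y]; simp only [pvEmpty_not_mem y, false_or]; exact hq y
        have hperm : s.length = o.length := ((List.perm_ext_iff_of_nodup hsn ho).2
          (fun y => by rw [hsame y]; exact hq y)).length_eq
        have hflen : p.flatten.length = o.length := by
          rw [pvEmpty_len] at hsl; omega
        have hlen : ((0 + (p.flatten.length : Int)) == (o.length : Int)) = true := by
          simp only [beq_iff_eq]; omega
        rw [hAeq, hlen]
        simp [hBeq]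
      · have hBeq : PySem.Set.equal s (PySem.Set.ofList o) = false := by
          apply Bool.eq_false_iff.mpr
          intro hc
          apply hq
          intro y
          have := ((PySem.Set.equal_iff _ _).mp hc) y
          rw [hsame y, PySem.Set.mem_ofList] at this
          exact this
        have hAeq : PySem.Set.equal (p.foldl (fun s part => PySem.Set.union s part) PySem.Set.empty) o = false := by
          apply Bool.eq_false_iff.mpr
          intro hc
          apply hq
          intro y
          have := ((PySem.Set.equal_iff _ _).mp hc) y
          rw [hU y] at this
          simpa [pvEmpty_not_mem y] using this
        rw [hAeq]
        simp [hBeq]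
  | none =>

      by_cases hc : PySem.Set.equal (p.foldl (fun s part => PySem.Set.union s part) PySem.Set.empty) o = true
      · have hlt := pvScanPart_none p.flatten PySem.Set.empty pvEmpty_nodup hscan o ho
          (fun y => by
            have := ((PySem.Set.equal_iff _ _).mp hc) y
            rw [hU y] at this
            simp only [pvEmpty_not_mem y, false_or] at this ⊢
            exact this.symm)
        rw [pvEmpty_len] at hlt
        have hlen : ((0 + (p.flatten.length : Int)) == (o.length : Int)) = false := by
          simp only [beq_eq_false_iff_ne, ne_eq]
          intro hh; omega
        rw [hlen]
        simp
      · rw [Bool.eq_false_iff.mpr hc]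
        simp
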